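-- pv_equiv track=rewrite | github.com/beyuyar/freeCodeCamp | 2026_Winter_Games_Day_9_Skeleton.py | get_difficulty
-- ===== SOURCE A (Python) =====
-- def get_difficulty(track):
--     moves = list(track)
--     points = 0
--     for n,m in enumerate(moves):
--         if not m == "S":
--             if n == 0:
--                 points +=5
--             else:
--                 if moves[n-1] != m and moves[n-1] != "S":
--                     points += 15
--                 else:
--                     points += 5
--     if  points <= 100:
--         return "Easy"
--     elif points <= 200:
--         return "Medium"
--     else:
--         return "Hard"
--     return track
-- ===== SOURCE B (Python) =====
-- def get_difficulty(track):
--     base = sum(1 for c in track if c != 'S')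
--     hard = sum(1 for a, b in zip(track, track[1:]) if a != 'S' and b != 'S' and a != b)
--     points = 5 * base + 10 * hard
--     if points <= 100:
--         return "Easy"
--     if points <= 200:
--         return "Medium"
--     return "Hard"
-- ===== Notes on version B (the rewrite author's own statement) =====
-- stated objective: simpler
-- what changed: Replaced the single index-lookback accumulating loop with two closed-form tallies (count of non-'S' chars, count of differing non-'S' adjacent pairs via zip) combined as points = 5*base + 10*hard.
import Mathlib
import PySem

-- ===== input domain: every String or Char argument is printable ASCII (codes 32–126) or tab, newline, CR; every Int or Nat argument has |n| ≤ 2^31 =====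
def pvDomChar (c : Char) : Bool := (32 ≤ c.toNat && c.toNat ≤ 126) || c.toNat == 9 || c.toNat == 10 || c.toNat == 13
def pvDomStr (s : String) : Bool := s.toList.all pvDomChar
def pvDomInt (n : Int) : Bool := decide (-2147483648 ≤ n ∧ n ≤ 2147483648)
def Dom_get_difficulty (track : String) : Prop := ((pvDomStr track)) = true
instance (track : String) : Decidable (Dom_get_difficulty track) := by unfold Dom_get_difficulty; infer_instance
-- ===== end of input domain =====

-- B replaces A's index-lookback accumulating loop by two closed-form tallies combined
-- arithmetically (objective: simpler); same return value everywhere.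

-- ===== PORT A =====
-- one step of A's for-loop body; `moves` is the whole list (the loop indexes back into it)
def pvAStep (moves : List Char) (points : Int) (nm : Int × Char) : Int :=
  if ¬ (nm.2 == 'S') then
    if nm.1 == 0 then points + 5
    else
      match PySem.List.pyGet? moves (nm.1 - 1) with  -- moves[n-1]; n ≥ 1 so always in range
      | some p => if p != nm.2 && p != 'S' then points + 15 else points + 5
      | none => points
  else points

def get_difficulty (track : String) : String :=
  let moves := track.toList
  let points : Int := (PySem.List.enumerate moves).foldl (pvAStep moves) 0
  if points ≤ 100 then "Easy"
  else if points ≤ 200 then "Medium"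
  else "Hard"

-- ===== PORT B =====
def get_difficulty_alt (track : String) : String :=
  let cs := track.toList
  let base : Int := (cs.filter (fun c => c != 'S')).length
  let hard : Int := ((cs.zip (PySem.List.slice cs (some 1) none)).filter
      (fun p => p.1 != 'S' && p.2 != 'S' && p.1 != p.2)).length
  let points : Int := 5 * base + 10 * hard
  if points ≤ 100 then "Easy"
  else if points ≤ 200 then "Medium"
  else "Hard"

-- ===== PRECONDITION & SPEC =====
def Spec_get_difficulty (track : String) (out : String) : Prop := out = get_difficulty_alt track
instance (track : String) (out : String) : Decidable (Spec_get_difficulty track out) := by unfold Spec_get_difficulty; infer_instance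

-- ===== CLAIM (what is proved, stated in full; the proofs are below) =====
def Claim_equal_get_difficulty : Prop := ∀ (track : String), Dom_get_difficulty track → Spec_get_difficulty track (get_difficulty track)

-- ===== LEMMAS AND PROOFS =====

-- A's loop re-expressed as structural recursion carrying the previous character
def pvScore (prev : Option Char) (cs : List Char) : Int :=
  match cs with
  | [] => 0
  | c :: rest =>
    (if c == 'S' then 0
     else match prev with
       | none => 5
       | some p => if p != c && p != 'S' then 15 else 5)
    + pvScore (some c) rest

-- transition count carrying the previous character
def pvTrans (prev : Option Char) (cs : List Char) : Int :=
  match cs with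
  | [] => 0
  | c :: rest =>
    (match prev with
     | some p => if p != c && p != 'S' && c != 'S' then 1 else 0
     | none => 0)
    + pvTrans (some c) rest

def pvBase (cs : List Char) : Int := (cs.filter (fun c => c != 'S')).length

def pvPairs (cs : List Char) : Int :=
  ((cs.zip cs.tail).filter (fun p => p.1 != 'S' && p.2 != 'S' && p.1 != p.2)).length

theorem pvA_loop_eq (rest : List Char) : ∀ (pre : List Char) (acc : Int),
    (PySem.List.enumerate rest ((pre.length : Int))).foldl (pvAStep (pre ++ rest)) acc
      = acc + pvScore pre.getLast? rest := by
  induction rest with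
  | nil => intro pre acc; simp [PySem.List.enumerate_nil, pvScore]
  | cons c rest ih =>
    intro pre acc
    rw [PySem.List.enumerate_cons, List.foldl_cons]
    have hmov : pre ++ c :: rest = (pre ++ [c]) ++ rest := by simp
    have hlen : ((pre.length : Int)) + 1 = (((pre ++ [c]).length : Int)) := by
      simp
    have step : pvAStep (pre ++ c :: rest) acc ((pre.length : Int), c)
        = acc + (if c == 'S' then 0
                 else match pre.getLast? with
                   | none => 5
                   | some p => if p != c && p != 'S' then 15 else 5) := by
      rcases List.eq_nil_or_concat pre with h | ⟨q, p, h⟩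
      · subst h
        by_cases hc : c == 'S' <;> simp [pvAStep, hc]
      · subst h
        have hq : q.concat p = q ++ [p] := by simp
        by_cases hc : c == 'S'
        · simp [pvAStep, hc]
        · have hidx : (((q ++ [p]).length : Int)) - 1 = (q.length : Int) := by
            simp
          have hget : PySem.List.pyGet? ((q ++ [p]) ++ c :: rest) ((q.length : Int))
              = some p := by
            have e : (q ++ [p]) ++ c :: rest = q ++ (p :: (c :: rest)) := by simp
            rw [e]; exact PySem.List.pyGet?_append_length q (c :: rest) p
          have hlast : (q ++ [p]).getLast? = some p := by simp
          rw [hq]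
          simp only [pvAStep, hc, hidx, hget, hlast]
          have hne : (((q ++ [p]).length : Int) == 0) = false := by
            simp; omega
          simp only [hne]
          by_cases hp : p != c && p != 'S' <;> simp [hp]
    rw [step, hmov, hlen, ih (pre ++ [c])]
    have hl : (pre ++ [c]).getLast? = some c := by simp
    rw [hl]
    simp only [pvScore]
    ring

theorem pvScore_eq_trans (cs : List Char) : ∀ (prev : Option Char),
    pvScore prev cs = 5 * pvBase cs + 10 * pvTrans prev cs := by
  induction cs with
  | nil => intro prev; simp [pvScore, pvBase, pvTrans]
  | cons c rest ih =>
    intro prev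
    by_cases hc : c == 'S'
    · have hcb : (c != 'S') = false := by simp [bne, hc]
      have hb : pvBase (c :: rest) = pvBase rest := by
        simp [pvBase, hcb]
      cases prev with
      | none => simp [pvScore, pvTrans, hc, ih (some c), hb]
      | some p =>
        have ht : (p != c && p != 'S' && c != 'S') = false := by
          rw [hcb, Bool.and_false]
        simp [pvScore, pvTrans, hc, ht, ih (some c), hb]
    · have hcb : (c != 'S') = true := by
        revert hc; cases h : (c == 'S') <;> simp [bne, h]
      have hcn : ¬ c = 'S' := by simpa using hc
      have hb : pvBase (c :: rest) = 1 + pvBase rest := by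
        simp [pvBase, hcb]; ring
      cases prev with
      | none => simp [pvScore, pvTrans, hc, ih (some c), hb]; ring
      | some p =>
        by_cases hp : p != c && p != 'S'
        · have ht : (p != c && p != 'S' && c != 'S') = true := by
            simp [hp, hcb]
          simp [pvScore, pvTrans, hc, hcn, hp, ih (some c), hb]; ring
        · have hp' : (p != c && p != 'S') = false := by
            revert hp; cases (p != c && p != 'S') <;> simp
          have ht : (p != c && p != 'S' && c != 'S') = false := by
            rw [hp', Bool.false_and]
          simp [pvScore, pvTrans, hc, hp', ih (some c), hb]; ring

theorem pvTrans_some_eq (cs : List Char) : ∀ (p : Char),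
    pvTrans (some p) cs = pvPairs (p :: cs) := by
  induction cs with
  | nil => intro p; simp [pvTrans, pvPairs]
  | cons c rest ih =>
    intro p
    have hz : (p :: c :: rest).zip (p :: c :: rest).tail
        = (p, c) :: ((c :: rest).zip rest) := by simp [List.zip]
    by_cases h : p != c && p != 'S' && c != 'S'
    · have h' : (p != 'S' && c != 'S' && p != c) = true := by
        simp only [Bool.and_eq_true] at h ⊢; tauto
      simp [pvTrans, pvPairs, h, h', ih c]
      ring
    · have h' : ¬ ((p != 'S' && c != 'S' && p != c) = true) := by
        simp only [Bool.and_eq_true] at h ⊢; tauto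
      simp [pvTrans, pvPairs, h, h', ih c]

theorem pvTrans_none_eq (cs : List Char) : pvTrans none cs = pvPairs cs := by
  cases cs with
  | nil => simp [pvTrans, pvPairs]
  | cons c rest => simpa [pvTrans, pvPairs] using pvTrans_some_eq rest c

-- ===== VERDICT (by name: the statement is the Claim_ definition above) =====
theorem get_difficulty_spec : Claim_equal_get_difficulty := by
  intro track _
  unfold Spec_get_difficulty get_difficulty get_difficulty_alt
  have h0 : (PySem.List.enumerate track.toList ((([] : List Char).length : Int))).foldl
      (pvAStep ([] ++ track.toList)) 0 = 0 + pvScore ([] : List Char).getLast? track.toList :=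
    pvA_loop_eq track.toList [] 0
  simp only [List.nil_append, List.length_nil, Nat.cast_zero, List.getLast?_nil] at h0
  have hpts : (PySem.List.enumerate track.toList).foldl (pvAStep track.toList) 0
      = 5 * pvBase track.toList
        + 10 * ((track.toList.zip (PySem.List.slice track.toList (some 1) none)).filter
            (fun p => p.1 != 'S' && p.2 != 'S' && p.1 != p.2)).length := by
    rw [show (PySem.List.enumerate track.toList)
          = PySem.List.enumerate track.toList (0 : Int) from rfl]
    rw [h0, pvScore_eq_trans, pvTrans_none_eq]
    rw [PySem.List.slice_from_one]
    simp [pvPairs]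
  simp only [hpts, pvBase]
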